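-- pv_equiv track=rewrite | github.com/JacksonLaVallee/Jane-Street-Puzzles | 2025/Feb/ScrabbleMax.py | highest_scrabble_letters
-- ===== SOURCE A (Python) =====
-- scrabble_scores = {
--     'A': 1, 'E': 1, 'I': 1, 'O': 1, 'U': 1, 'L': 1, 'N': 1, 'S': 1, 'T': 1, 'R': 1,
--     'D': 2, 'G': 2,
--     'B': 3, 'C': 3, 'M': 3, 'P': 3,
--     'F': 4, 'H': 4, 'V': 4, 'W': 4, 'Y': 4,
--     'K': 5,
--     'J': 8, 'X': 8,
--     'Q': 10, 'Z': 10
-- }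
--
-- def highest_scrabble_letters(input_string):
--     best_score = 0
--     best_letters = []  # To store letters (keeping their original case if needed)
--
--     for char in input_string:
--         upper_char = char.upper()
--         if upper_char in scrabble_scores:
--             score = scrabble_scores[upper_char]
--             if score > best_score:
--                 best_score = score
--                 best_letters = [char]
--             elif score == best_score:
--                 # Avoid duplicate entries if needed (optional)
--                 if char not in best_letters:
--                     best_letters.append(char)
--     return best_letters, best_score
-- ===== SOURCE B (Python) =====
-- scrabble_scores = {
--     'A': 1, 'E': 1, 'I': 1, 'O': 1, 'U': 1, 'L': 1, 'N': 1, 'S': 1, 'T': 1, 'R': 1,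
--     'D': 2, 'G': 2,
--     'B': 3, 'C': 3, 'M': 3, 'P': 3,
--     'F': 4, 'H': 4, 'V': 4, 'W': 4, 'Y': 4,
--     'K': 5,
--     'J': 8, 'X': 8,
--     'Q': 10, 'Z': 10
-- }
--
-- def highest_scrabble_letters(input_string):
--     # Pass 1: the best score (0 if no character scores).
--     best_score = max((scrabble_scores[c.upper()] for c in input_string
--                       if c.upper() in scrabble_scores), default=0)
--     # Pass 2: first occurrences (case-sensitive) of characters achieving it.
--     best_letters = []
--     seen = set()
--     for char in input_string:
--         if scrabble_scores.get(char.upper()) == best_score and char not in seen: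
--             seen.add(char)
--             best_letters.append(char)
--     return best_letters, best_score
-- ===== Notes on version B (the rewrite author's own statement) =====
-- stated objective: simpler
-- what changed: Replaces the single running-max loop that rebuilds/extends best_letters on the fly with a compute-the-max-first pass followed by a filter pass that keeps first occurrences via a seen set.
import Mathlib
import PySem

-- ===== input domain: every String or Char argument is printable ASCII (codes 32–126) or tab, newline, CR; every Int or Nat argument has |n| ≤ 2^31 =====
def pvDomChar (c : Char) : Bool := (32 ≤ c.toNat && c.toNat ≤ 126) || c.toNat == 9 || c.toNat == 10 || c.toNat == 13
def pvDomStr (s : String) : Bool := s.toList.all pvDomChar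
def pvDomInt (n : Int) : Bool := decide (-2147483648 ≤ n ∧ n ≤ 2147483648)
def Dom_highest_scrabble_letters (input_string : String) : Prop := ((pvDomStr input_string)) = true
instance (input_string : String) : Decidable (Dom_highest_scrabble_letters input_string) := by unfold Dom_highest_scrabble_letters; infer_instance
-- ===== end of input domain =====

-- B computes the best score first, then filters the string for first occurrences of
-- the characters achieving it (a seen set), instead of A's single running-max loop.

-- module-level dict scrabble_scores (shared context of both Pythons)
def scrabbleScores : PySem.Dict Char Int :=
  PySem.Dict.ofList
    [('A',1), ('E',1), ('I',1), ('O',1), ('U',1), ('L',1), ('N',1), ('S',1), ('T',1), ('R',1),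
     ('D',2), ('G',2),
     ('B',3), ('C',3), ('M',3), ('P',3),
     ('F',4), ('H',4), ('V',4), ('W',4), ('Y',4),
     ('K',5),
     ('J',8), ('X',8),
     ('Q',10), ('Z',10)]

-- ===== PORT A =====
-- A: one pass, running best_score / best_letters ('upper_char in scrabble_scores' +
-- lookup ported together as Dict.get?).
def highest_scrabble_letters (input_string : String) : List String × Int :=
  input_string.toList.foldl
    (fun st char =>
      let upper_char := PySem.Chars.upperChar char
      match PySem.Dict.get? scrabbleScores upper_char with
      | none => st
      | some score =>
        if score > st.2 then ([String.mk [char]], score)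
        else if score = st.2 then
          if String.mk [char] ∈ st.1 then st else (st.1 ++ [String.mk [char]], st.2)
        else st)
    ([], 0)

-- ===== PORT B =====
-- pass 2 of B: collect first occurrences of chars whose score equals m, in order
def bCollect (m : Int) (seen : PySem.Set String) : List Char → List String
  | [] => []
  | char :: cs =>
    if PySem.Dict.get? scrabbleScores (PySem.Chars.upperChar char) = some m
        ∧ ¬ PySem.Set.contains seen (String.mk [char]) then
      String.mk [char] :: bCollect m (PySem.Set.add seen (String.mk [char])) cs
    else bCollect m seen cs

def highest_scrabble_letters_alt (input_string : String) : List String × Int :=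
  let cs := input_string.toList
  let best_score :=
    (cs.filterMap (fun c => PySem.Dict.get? scrabbleScores (PySem.Chars.upperChar c))).foldl max 0
  (bCollect best_score [] cs, best_score)

-- ===== PRECONDITION & SPEC =====
def Spec_highest_scrabble_letters (input_string : String) (out : List String × Int) : Prop := out = highest_scrabble_letters_alt input_string
instance (input_string : String) (out : List String × Int) : Decidable (Spec_highest_scrabble_letters input_string out) := by unfold Spec_highest_scrabble_letters; infer_instance

-- ===== CLAIM (what is proved, stated in full; the proofs are below) =====
def Claim_equal_highest_scrabble_letters : Prop := ∀ (input_string : String), Dom_highest_scrabble_letters input_string → Spec_highest_scrabble_letters input_string (highest_scrabble_letters input_string)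

-- ===== LEMMAS AND PROOFS =====

-- score of one character (proof abbreviation)
def scOf (c : Char) : Option Int := PySem.Dict.get? scrabbleScores (PySem.Chars.upperChar c)

-- B's best_score, recursively
def maxB : List Char → Int
  | [] => 0
  | c :: cs => match scOf c with
    | none => maxB cs
    | some k => max k (maxB cs)

lemma foldl_max_shift (l : List Int) : ∀ a b : Int, l.foldl max (max a b) = max a (l.foldl max b) := by
  induction l with
  | nil => intro a b; simp
  | cons x xs ih =>
      intro a b
      simp only [List.foldl]
      rw [max_assoc, ih]

lemma maxB_eq (cs : List Char) :
    (cs.filterMap scOf).foldl max 0 = maxB cs := by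
  induction cs with
  | nil => simp [maxB]
  | cons c cs ih =>
      simp only [List.filterMap_cons, maxB]
      cases h : scOf c with
      | none => simpa using ih
      | some k =>
          simp only [List.foldl]
          rw [show max (0 : Int) k = max k 0 from max_comm 0 k, foldl_max_shift, ih]

lemma maxB_nonneg (cs : List Char) : 0 ≤ maxB cs := by
  induction cs with
  | nil => simp [maxB]
  | cons c cs ih =>
      simp only [maxB]
      cases scOf c with
      | none => exact ih
      | some k => exact le_trans ih (le_max_right _ _)

lemma bCollect_skip (m : Int) (seen : List String) (c : Char) (cs : List Char)
    (h : scOf c ≠ some m) :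
    bCollect m seen (c :: cs) = bCollect m seen cs := by
  simp only [bCollect]
  rw [if_neg]
  intro ⟨h1, _⟩; exact h h1

lemma contains_iff (seen : List String) (x : String) :
    PySem.Set.contains seen x = true ↔ x ∈ seen := by
  simp [PySem.Set.contains]

lemma bCollect_emit (m : Int) (seen : List String) (c : Char) (cs : List Char)
    (h : scOf c = some m) (hmem : String.mk [c] ∉ seen) :
    bCollect m seen (c :: cs) = String.mk [c] :: bCollect m (seen ++ [String.mk [c]]) cs := by
  simp only [bCollect]
  rw [if_pos, PySem.Set.add, if_neg]
  · simp [hmem]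
  · exact ⟨h, by simp [hmem]⟩

lemma bCollect_seen (m : Int) (seen : List String) (c : Char) (cs : List Char)
    (h : String.mk [c] ∈ seen) :
    bCollect m seen (c :: cs) = bCollect m seen cs := by
  simp only [bCollect]
  rw [if_neg]
  intro ⟨_, h2⟩
  exact h2 ((contains_iff seen _).2 h)

-- A's loop body, named for the induction
def stepA (st : List String × Int) (char : Char) : List String × Int :=
  match PySem.Dict.get? scrabbleScores (PySem.Chars.upperChar char) with
  | none => st
  | some score =>
    if score > st.2 then ([String.mk [char]], score)
    else if score = st.2 then
      if String.mk [char] ∈ st.1 then st else (st.1 ++ [String.mk [char]], st.2)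
    else st

-- Main invariant: A's fold from state (bl, bs) either keeps bs (appending the equal
-- scorers not yet listed) or, when a strictly better score occurs, produces exactly
-- B's max-then-filter result on the remaining characters.
lemma loop_inv (cs : List Char) : ∀ (bl : List String) (bs : Int), 0 ≤ bs →
    cs.foldl stepA (bl, bs) =
      if bs < maxB cs then (bCollect (maxB cs) [] cs, maxB cs)
      else (bl ++ bCollect bs bl cs, bs) := by
  induction cs with
  | nil =>
      intro bl bs hbs
      simp only [List.foldl, maxB, bCollect]
      rw [if_neg (by omega)]
      simp
  | cons c cs ih =>
      intro bl bs hbs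
      rw [List.foldl_cons]
      cases hsc : PySem.Dict.get? scrabbleScores (PySem.Chars.upperChar c) with
      | none =>
          have hm : maxB (c :: cs) = maxB cs := by simp [maxB, scOf, hsc]
          have hstep : stepA (bl, bs) c = (bl, bs) := by simp [stepA, hsc]
          rw [hstep, ih bl bs hbs, hm]
          by_cases hlt : bs < maxB cs
          · rw [if_pos hlt, if_pos hlt, bCollect_skip _ _ _ _ (by simp [scOf, hsc])]
          · rw [if_neg hlt, if_neg hlt, bCollect_skip _ _ _ _ (by simp [scOf, hsc])]
      | some k =>
          have hm : maxB (c :: cs) = max k (maxB cs) := by simp [maxB, scOf, hsc]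
          rw [hm]
          by_cases hgt : k > bs
          · have hstep : stepA (bl, bs) c = ([String.mk [c]], k) := by
              simp only [stepA, hsc]; rw [if_pos hgt]
            rw [hstep, ih [String.mk [c]] k (by omega)]
            by_cases h2 : k < maxB cs
            · rw [if_pos h2, if_pos (by rw [lt_max_iff]; omega),
                max_eq_right (by omega : k ≤ maxB cs),
                bCollect_skip _ _ _ _ (by simp [scOf, hsc]; omega)]
            · rw [if_neg h2, if_pos (by rw [lt_max_iff]; omega),
                max_eq_left (by omega : maxB cs ≤ k),
                bCollect_emit _ _ _ _ (by simp [scOf, hsc]) (by simp)]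
              simp
          · by_cases heq : k = bs
            · subst heq
              by_cases hmem : String.mk [c] ∈ bl
              · have hstep : stepA (bl, k) c = (bl, k) := by
                  simp only [stepA, hsc]; rw [if_neg hgt]; simp [hmem]
                rw [hstep, ih bl k hbs]
                by_cases h2 : k < maxB cs
                · rw [if_pos h2, if_pos (by rw [lt_max_iff]; omega),
                    max_eq_right (by omega : k ≤ maxB cs),
                    bCollect_skip _ _ _ _ (by simp [scOf, hsc]; omega)]
                · rw [if_neg h2, if_neg (by rw [lt_max_iff]; omega),
                    bCollect_seen _ _ _ _ hmem]
              · have hstep : stepA (bl, k) c = (bl ++ [String.mk [c]], k) := by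
                  simp only [stepA, hsc]; rw [if_neg hgt]; simp [hmem]
                rw [hstep, ih (bl ++ [String.mk [c]]) k hbs]
                by_cases h2 : k < maxB cs
                · rw [if_pos h2, if_pos (by rw [lt_max_iff]; omega),
                    max_eq_right (by omega : k ≤ maxB cs),
                    bCollect_skip _ _ _ _ (by simp [scOf, hsc]; omega)]
                · rw [if_neg h2, if_neg (by rw [lt_max_iff]; omega),
                    bCollect_emit _ _ _ _ (by simp [scOf, hsc]) hmem]
                  simp
            · have hstep : stepA (bl, bs) c = (bl, bs) := by
                simp only [stepA, hsc]; rw [if_neg hgt, if_neg heq]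
              rw [hstep, ih bl bs hbs]
              by_cases h2 : bs < maxB cs
              · rw [if_pos h2, if_pos (by rw [lt_max_iff]; omega),
                  max_eq_right (by omega : k ≤ maxB cs),
                  bCollect_skip _ _ _ _ (by simp [scOf, hsc]; omega)]
              · rw [if_neg h2, if_neg (by rw [lt_max_iff]; omega),
                  bCollect_skip _ _ _ _ (by simp [scOf, hsc]; omega)]

-- ===== VERDICT (by name: the statement is the Claim_ definition above) =====
theorem highest_scrabble_letters_spec : Claim_equal_highest_scrabble_letters := by
  intro s _
  unfold Spec_highest_scrabble_letters highest_scrabble_letters highest_scrabble_letters_alt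
  rw [show (fun (st : List String × Int) char =>
      let upper_char := PySem.Chars.upperChar char
      match PySem.Dict.get? scrabbleScores upper_char with
      | none => st
      | some score =>
        if score > st.2 then ([String.mk [char]], score)
        else if score = st.2 then
          if String.mk [char] ∈ st.1 then st else (st.1 ++ [String.mk [char]], st.2)
        else st) = stepA from rfl]
  rw [loop_inv s.toList [] 0 le_rfl]
  have hmb : (s.toList.filterMap
      (fun c => PySem.Dict.get? scrabbleScores (PySem.Chars.upperChar c))).foldl max 0
      = maxB s.toList := maxB_eq s.toList
  simp only [hmb]
  by_cases h : (0 : Int) < maxB s.toList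
  · rw [if_pos h]
  · rw [if_neg h]
    have h0 : maxB s.toList = 0 := le_antisymm (by omega) (maxB_nonneg _)
    rw [h0]
    simp
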